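-- pv_equiv track=rewrite | github.com/Diaboy01/KI-Logs | malicious_log_generator.py | clean_redundant_get_requests
-- ===== SOURCE A (Python) =====
-- def clean_redundant_get_requests(url):
--     parts = url.split(" ")
--     cleaned_parts = []
--     seen_get = False
--     for part in parts:
--         if part.startswith("GET"):
--             if not seen_get:
--                 seen_get = True
--                 cleaned_parts.append(part)
--         else:
--             cleaned_parts.append(part)
--     return " ".join(cleaned_parts)
-- ===== SOURCE B (Python) =====
-- def clean_redundant_get_requests(url):
--     def go(parts):
--         if not parts:
--             return []
--         head, rest = parts[0], parts[1:]
--         if head.startswith("GET"):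
--             return [head] + [q for q in rest if not q.startswith("GET")]
--         return [head] + go(rest)
--     return " ".join(go(url.split(" ")))
-- ===== Notes on version B (the rewrite author's own statement) =====
-- stated objective: simpler
-- what changed: Replaces A's single stateful flag loop by structural recursion that stops at the first GET token and finishes with one filter over the remaining tail (no seen flag, no per-element state).
import Mathlib
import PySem

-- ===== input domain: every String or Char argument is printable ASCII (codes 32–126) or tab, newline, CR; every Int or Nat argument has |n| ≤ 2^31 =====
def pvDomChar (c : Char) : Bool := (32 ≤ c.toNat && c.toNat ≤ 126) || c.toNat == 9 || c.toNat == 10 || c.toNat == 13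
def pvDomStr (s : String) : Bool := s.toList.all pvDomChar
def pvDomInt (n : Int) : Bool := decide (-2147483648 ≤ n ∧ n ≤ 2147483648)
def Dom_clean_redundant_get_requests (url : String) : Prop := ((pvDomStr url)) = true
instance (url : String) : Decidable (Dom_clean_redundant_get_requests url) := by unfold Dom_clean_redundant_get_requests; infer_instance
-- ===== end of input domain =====

-- B replaces A's single stateful pass (seen_get flag) by structural recursion that stops at
-- the first GET token and finishes with one filter over the tail (objective: simpler).

-- ===== PORT A =====
-- literal port of A: one pass over the parts with an accumulator list and a seen_get flag
def clean_redundant_get_requests (url : String) : String :=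
  let parts := (PySem.Str.split? url " ").getD []
  let st := parts.foldl
    (fun (st : List String × Bool) part =>
      if PySem.Str.startswith part "GET" then
        if !st.2 then (st.1 ++ [part], true) else st
      else
        (st.1 ++ [part], st.2))
    ([], false)
  PySem.Str.join " " st.1

-- ===== PORT B =====
-- literal port of B's helper go: recursion on the token list; at the first GET token it
-- returns that token followed by the GET-free filter of the rest
def pvGo : List String → List String
  | [] => []
  | head :: rest =>
    if PySem.Str.startswith head "GET" then
      head :: rest.filter (fun q => !PySem.Str.startswith q "GET")
    else
      head :: pvGo rest

def clean_redundant_get_requests_alt (url : String) : String :=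
  PySem.Str.join " " (pvGo ((PySem.Str.split? url " ").getD []))

-- ===== PRECONDITION & SPEC =====
def Spec_clean_redundant_get_requests (url : String) (out : String) : Prop := out = clean_redundant_get_requests_alt url
instance (url : String) (out : String) : Decidable (Spec_clean_redundant_get_requests url out) := by unfold Spec_clean_redundant_get_requests; infer_instance

-- ===== CLAIM (what is proved, stated in full; the proofs are below) =====
def Claim_equal_clean_redundant_get_requests : Prop := ∀ (url : String), Dom_clean_redundant_get_requests url → Spec_clean_redundant_get_requests url (clean_redundant_get_requests url)

-- ===== LEMMAS AND PROOFS =====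

-- A's fold, once the flag is set, just filters out GET tokens
lemma pvA_seen (parts : List String) : ∀ acc : List String,
    (parts.foldl
      (fun (st : List String × Bool) part =>
        if PySem.Str.startswith part "GET" then
          if !st.2 then (st.1 ++ [part], true) else st
        else
          (st.1 ++ [part], st.2))
      (acc, true)).1
    = acc ++ parts.filter (fun q => !PySem.Str.startswith q "GET") := by
  induction parts with
  | nil => intro acc; simp
  | cons p ps ih =>
    intro acc
    by_cases h : PySem.Chars.startswith p.toList ['G', 'E', 'T'] = true
    · simpa [h, List.filter_cons] using ih acc
    · simpa [h, List.filter_cons] using ih (acc ++ [p])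

-- A's fold from the initial (unset) flag computes pvGo
lemma pvA_eq (parts : List String) : ∀ acc : List String,
    (parts.foldl
      (fun (st : List String × Bool) part =>
        if PySem.Str.startswith part "GET" then
          if !st.2 then (st.1 ++ [part], true) else st
        else
          (st.1 ++ [part], st.2))
      (acc, false)).1
    = acc ++ pvGo parts := by
  induction parts with
  | nil => intro acc; simp [pvGo]
  | cons p ps ih =>
    intro acc
    by_cases h : PySem.Chars.startswith p.toList ['G', 'E', 'T'] = true
    · simpa [h, pvGo] using pvA_seen ps (acc ++ [p])
    · simpa [h, pvGo] using ih (acc ++ [p])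

-- ===== VERDICT (by name: the statement is the Claim_ definition above) =====
theorem clean_redundant_get_requests_spec : Claim_equal_clean_redundant_get_requests := by
  intro url _
  unfold Spec_clean_redundant_get_requests
  unfold clean_redundant_get_requests clean_redundant_get_requests_alt
  simp only [pvA_eq _ [], List.nil_append]
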